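-- pv_equiv track=rewrite | github.com/RideABE/CTF_Training | Winter_vacation_training/2025-1-15Misc中级/Questions/Case64AR/deal.py | caesar_cipher_base64
-- ===== SOURCE A (Python) =====
-- def caesar_cipher_base64(text, base_table, shift, mode="encode"):
--     """
--     Perform Caesar cipher encoding/decoding on a Base64 string.
--
--     Args:
--         text (str): Input text (Base64 encoded or decoded).
--         base_table (str): Base64 character table.
--         shift (int): Offset for the Caesar cipher.
--         mode (str): "encode" for encoding, "decode" for decoding.
--
--     Returns:
--         str: Encoded or decoded text.
--     """
--     if mode == "decode":
--         shift = -shift  # Reverse the shift for decoding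
--
--     # Map input characters through the Base64 table with the shift
--     transformed_text = ""
--     for char in text:
--         if char in base_table:
--             # Find the character index and apply the shift
--             index = (base_table.index(char) + shift) % len(base_table)
--             transformed_text += base_table[index]
--         else:
--             # Preserve characters not in the base table (e.g., padding '=' or newlines)
--             transformed_text += char
--     return transformed_text
--
-- base_table = "ABCDEFGHIJKLMNOPQRSTUVWXYZabcdefghijklmnopqrstuvwxyz0123456789+/"
-- ===== SOURCE B (Python) =====
-- def caesar_cipher_base64(text, base_table, shift, mode="encode"):
--     s = -shift if mode == "decode" else shift
--     n = len(base_table)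
--     table = {}
--     for i, c in enumerate(base_table):
--         # keep the FIRST occurrence, matching .index semantics on duplicate tables
--         table.setdefault(c, base_table[(i + s) % n])
--     return text.translate(str.maketrans(table))
-- ===== Notes on version B (the rewrite author's own statement) =====
-- stated objective: idiomatic
-- what changed: A scans base_table twice per character ('in' plus .index) inside an explicit string-building loop; B precomputes one translation table (setdefault over enumerate keeps the first occurrence, matching .index) and does a single str.translate pass.
import Mathlib
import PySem

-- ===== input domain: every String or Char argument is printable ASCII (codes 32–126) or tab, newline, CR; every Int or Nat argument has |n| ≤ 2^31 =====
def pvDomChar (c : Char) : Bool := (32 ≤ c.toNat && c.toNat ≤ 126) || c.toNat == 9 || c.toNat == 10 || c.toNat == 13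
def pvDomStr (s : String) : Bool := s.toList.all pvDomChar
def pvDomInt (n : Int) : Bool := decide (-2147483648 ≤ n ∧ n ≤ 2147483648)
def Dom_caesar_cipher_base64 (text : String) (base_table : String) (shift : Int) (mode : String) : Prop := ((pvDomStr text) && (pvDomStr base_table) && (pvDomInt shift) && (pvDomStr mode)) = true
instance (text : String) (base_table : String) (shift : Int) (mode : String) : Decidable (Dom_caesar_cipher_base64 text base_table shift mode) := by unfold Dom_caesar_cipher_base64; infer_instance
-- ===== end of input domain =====

-- B replaces A's per-character `in`/`.index` scans by a translation table built once
-- (first occurrence kept) and a single translate pass; same output, different structure.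

-- ===== PORT A =====
-- Literal port of A: per character, membership scan, .index scan, shifted lookup.
-- base_table[index] is ported with pyGet?; the `.getD char` default is never reached,
-- since the computed index is provably in range whenever char ∈ base_table.
def caesar_cipher_base64 (text : String) (base_table : String) (shift : Int) (mode : String) : String :=
  let shift := if mode == "decode" then -shift else shift
  let transformed := text.toList.foldl (fun acc char =>
    if char ∈ base_table.toList then
      acc ++ [(PySem.List.pyGet? base_table.toList
        (PySem.Int.mod ((((PySem.List.index? base_table.toList char).getD 0 : Nat) : Int) + shift)
          (base_table.toList.length : Int))).getD char]
    else acc ++ [char]) []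
  String.ofList transformed

-- ===== PORT B =====
-- Literal port of Source B: build the translation dict once with setdefault over
-- enumerate(base_table) (first occurrence wins), then one translate pass over text
-- (characters absent from the dict pass through unchanged).
def caesar_cipher_base64_alt (text : String) (base_table : String) (shift : Int) (mode : String) : String :=
  let s := if mode == "decode" then -shift else shift
  let n : Int := (base_table.toList.length : Int)
  let table := (PySem.List.enumerate base_table.toList).foldl
    (fun d p => d.setdefault p.2 ((PySem.List.pyGet? base_table.toList (PySem.Int.mod (p.1 + s) n)).getD p.2))
    PySem.Dict.empty
  String.ofList (text.toList.map (fun c => (table.get? c).getD c))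

-- ===== PRECONDITION & SPEC =====
def Spec_caesar_cipher_base64 (text : String) (base_table : String) (shift : Int) (mode : String) (out : String) : Prop := out = caesar_cipher_base64_alt text base_table shift mode
instance (text : String) (base_table : String) (shift : Int) (mode : String) (out : String) : Decidable (Spec_caesar_cipher_base64 text base_table shift mode out) := by unfold Spec_caesar_cipher_base64; infer_instance

-- ===== CLAIM (what is proved, stated in full; the proofs are below) =====
def Claim_equal_caesar_cipher_base64 : Prop := ∀ (text : String) (base_table : String) (shift : Int) (mode : String), Dom_caesar_cipher_base64 text base_table shift mode → Spec_caesar_cipher_base64 text base_table shift mode (caesar_cipher_base64 text base_table shift mode)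

-- ===== LEMMAS AND PROOFS =====

-- get? after folding setdefault: existing keys win; otherwise the FIRST matching pair.
theorem pv_get?_foldl_setdefault (f : Int × Char → Char) :
    ∀ (ps : List (Int × Char)) (d : PySem.Dict Char Char) (c : Char),
    (ps.foldl (fun d p => d.setdefault p.2 (f p)) d).get? c
      = ((d.get? c).or ((ps.find? (fun p => p.2 == c)).map f)) := by
  intro ps
  induction ps with
  | nil => intro d c; simp
  | cons p ps ih =>
    intro d c
    simp only [List.foldl_cons, List.find?_cons]
    by_cases h : p.2 = c
    · subst h
      rw [ih, PySem.Dict.get?_setdefault_self]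
      simp only [BEq.rfl]
      cases hd : d.get? p.2 <;> simp
    · have hne : (p.2 == c) = false := by simp [h]
      rw [ih, PySem.Dict.get?_setdefault_of_ne d (f p) (Ne.symm h)]
      simp [hne]

-- find? over enumerate picks the first index of c, as index? does.
theorem pv_find?_enumerate (c : Char) :
    ∀ (bt : List Char) (s0 : Int),
    (PySem.List.enumerate bt s0).find? (fun p => p.2 == c)
      = (PySem.List.index? bt c).map (fun k : Nat => ((s0 + (k : Int)), c)) := by
  intro bt
  induction bt with
  | nil => intro s0; simp [PySem.List.enumerate_nil, PySem.List.index?_eq_idxOf?]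
  | cons x xs ih =>
    intro s0
    rw [PySem.List.enumerate_cons]
    by_cases h : x = c
    · subst h
      rw [PySem.List.index?_cons_self]
      simp
    · have hne : (x == c) = false := by simp [h]
      rw [PySem.List.index?_cons_of_ne xs h]
      simp only [List.find?_cons, hne, ih (s0 + 1), Option.map_map]
      cases PySem.List.index? xs c <;> simp
      · ring

-- the dict B builds looks up exactly A's per-character value
theorem pv_table_get (bt : List Char) (s : Int) (c : Char) :
    ((((PySem.List.enumerate bt).foldl
        (fun d p => d.setdefault p.2 ((PySem.List.pyGet? bt (PySem.Int.mod (p.1 + s) (bt.length : Int))).getD p.2))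
        PySem.Dict.empty).get? c).getD c)
    = (if c ∈ bt then
        (PySem.List.pyGet? bt
          (PySem.Int.mod ((((PySem.List.index? bt c).getD 0 : Nat) : Int) + s) (bt.length : Int))).getD c
      else c) := by
  rw [pv_get?_foldl_setdefault, pv_find?_enumerate, PySem.Dict.get?_empty]
  by_cases h : c ∈ bt
  · obtain ⟨k, hk⟩ := Option.isSome_iff_exists.mp ((PySem.List.index?_isSome_iff bt c).mpr h)
    rw [hk]
    simp [h]
  · have hnone : PySem.List.index? bt c = none := (PySem.List.index?_eq_none_iff bt c).mpr h
    rw [hnone]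
    simp [h]

-- A's append-accumulating fold is the map of its per-character function
theorem pv_foldl_append (g : Char → Char) (P : Char → Prop) [DecidablePred P] :
    ∀ (xs acc : List Char),
    (xs.foldl (fun acc char => if P char then acc ++ [g char] else acc ++ [char]) acc)
      = acc ++ xs.map (fun char => if P char then g char else char) := by
  intro xs
  induction xs with
  | nil => intro acc; simp
  | cons x xs ih =>
    intro acc
    by_cases h : P x <;> simp [h, ih]

-- ===== VERDICT (by name: the statement is the Claim_ definition above) =====
theorem caesar_cipher_base64_spec : Claim_equal_caesar_cipher_base64 := by
  unfold Claim_equal_caesar_cipher_base64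
  intro text base_table shift mode _
  unfold Spec_caesar_cipher_base64 caesar_cipher_base64 caesar_cipher_base64_alt
  simp only []
  congr 1
  rw [pv_foldl_append]
  simp only [List.nil_append]
  apply List.map_congr_left
  intro c _
  rw [pv_table_get base_table.toList (if mode == "decode" then -shift else shift) c]
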